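-- pv_equiv track=rewrite | github.com/ezhivodiorov/checkio | Strings Theory/Fibonacci Poem.py | fibo_poem
-- ===== SOURCE A (Python) =====
-- def fib(number):
--     a, b = 0, 1
--     for x in range(number):
--         a, b = b, a + b
--     return a
--
-- def fibo_poem(text):
--
--     # Розбиття тексту на окремі слова
--     words = text.split()
--
--     fib_text = []  # Результатний багаторядковий текст
--
--     # Формування багаторядкового тексту
--     circle = 1
--     while True:
--         fib_num = fib(circle)
--         if len(words) == 0:
--             break
--         line_words = words[:fib_num]  # Вибір кількості слів, що дорівнює числу Фібоначчі
--         line = ' '.join(line_words)  # Формування рядка зі словами, розділеними пробілами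
--         line += ' _' * (fib_num - len(line_words))  # Доповнення до коректної довжини
--         fib_text.append(line)
--         words = words[fib_num:]  # Видалення використаних слів
--         circle += 1
--
--     return '\n'.join(fib_text)
-- ===== SOURCE B (Python) =====
-- def fibo_poem(text):
--     words = text.split()
--     if not words:
--         return ''
--     # fib line sizes 1, 1, 2, 3, 5, ... until they cover all words
--     a, b = 1, 1
--     total = 0
--     sizes = []
--     while total < len(words):
--         sizes.append(a)
--         total += a
--         a, b = b, a + b
--     # pad the word list up front so the last line needs no special case
--     words = words + ['_'] * (total - len(words))
--     lines = []
--     i = 0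
--     for n in sizes:
--         lines.append(' '.join(words[i:i + n]))
--         i += n
--     return '\n'.join(lines)
-- ===== Notes on version B (the rewrite author's own statement) =====
-- stated objective: alternative
-- what changed: Instead of A's unbounded while-loop that recomputes fib(circle) from scratch each round and repeatedly reslices the word list with padding patched onto the last line, B first rolls one (a,b) pair to collect the list of fib line sizes, pads the word list up front with placeholder words so every line is a uniform join, and then chunks by index.
import Mathlib
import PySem

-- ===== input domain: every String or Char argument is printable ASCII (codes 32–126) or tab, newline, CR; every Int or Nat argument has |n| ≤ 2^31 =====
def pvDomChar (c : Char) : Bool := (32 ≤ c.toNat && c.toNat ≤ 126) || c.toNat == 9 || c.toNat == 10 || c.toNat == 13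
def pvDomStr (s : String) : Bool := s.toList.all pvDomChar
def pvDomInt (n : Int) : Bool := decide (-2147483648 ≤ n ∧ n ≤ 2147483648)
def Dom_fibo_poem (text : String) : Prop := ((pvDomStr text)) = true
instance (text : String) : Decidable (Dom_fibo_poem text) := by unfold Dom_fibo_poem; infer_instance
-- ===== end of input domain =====

-- B collects the fib line sizes with one rolling pair, pads the word list up front so every
-- line is a uniform join, and chunks by index — replacing A's per-line fib recomputation,
-- repeated reslicing and final-line padding patch (objective: alternative decomposition).

-- ===== PORT A =====
-- fib(number): a,b = 0,1; for x in range(number): a,b = b,a+b; return a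
def fibA (number : Int) : Int :=
  ((PySem.List.pyRange 0 number 1).foldl (fun (p : Int × Int) _ => (p.2, p.1 + p.2)) (0, 1)).1

-- the 'while True' loop; fuel = the initial word count bounds the iterations (each round
-- either breaks or removes fib(circle) ≥ 1 words), and fuel exhaustion returns the same
-- accumulator the 'break' returns — a totality guard only, not a change of algorithm.
def fiboLoop (fuel : Nat) (circle : Int) (words : List String) (fib_text : List String) :
    List String :=
  match fuel with
  | 0 => fib_text
  | fuel + 1 =>
    let fib_num := fibA circle
    if words = [] then fib_text
    else
      let line_words := PySem.List.slice words none (some fib_num)  -- words[:fib_num]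
      let line := PySem.Str.join " " line_words                      -- ' '.join(line_words)
      -- line += ' _' * (fib_num - len(line_words))
      let line := line ++ String.ofList
        (PySem.List.pyRepeat [' ', '_'] (fib_num - (line_words.length : Int)))
      fiboLoop fuel (circle + 1) (PySem.List.slice words (some fib_num) none)
        (fib_text ++ [line])

def fibo_poem (text : String) : String :=
  let words := PySem.Str.split₀ text
  PySem.Str.join "\n" (fiboLoop words.length 1 words [])

-- ===== PORT B =====
-- the 'while total < len(words)' loop collecting sizes; total grows by a ≥ 1 each round,
-- so fuel = len(words) bounds the iterations (totality guard only).
def fibSizes (fuel : Nat) (a b : Nat) (total : Nat) (len : Nat) : List Nat :=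
  match fuel with
  | 0 => []
  | fuel + 1 =>
    if total < len then a :: fibSizes fuel b (a + b) (total + a) len else []

-- the 'for n in sizes' loop; words[i:i+n] is (drop i).take n (PySem.List.slice_natCast_add)
def chunkJoin : List Nat → Nat → List String → List String
  | [], _, _ => []
  | n :: rest, i, padded =>
    PySem.Str.join " " ((padded.drop i).take n) :: chunkJoin rest (i + n) padded

def fibo_poem_alt (text : String) : String :=
  let words := PySem.Str.split₀ text
  if words = [] then ""
  else
    let sizes := fibSizes words.length 1 1 0 words.length
    let padded := words ++ List.replicate (sizes.sum - words.length) "_"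
    PySem.Str.join "\n" (chunkJoin sizes 0 padded)

-- ===== PRECONDITION & SPEC =====
def Spec_fibo_poem (text : String) (out : String) : Prop := out = fibo_poem_alt text
instance (text : String) (out : String) : Decidable (Spec_fibo_poem text out) := by
  unfold Spec_fibo_poem; infer_instance

-- ===== CLAIM (what is proved, stated in full; the proofs are below) =====
def Claim_equal_fibo_poem : Prop :=
  ∀ (text : String), Dom_fibo_poem text → Spec_fibo_poem text (fibo_poem text)

-- ===== LEMMAS AND PROOFS =====

-- the fib pair after n steps
def fibP : Nat → Nat × Nat
  | 0 => (0, 1)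
  | n + 1 => ((fibP n).2, (fibP n).1 + (fibP n).2)

-- common reference: the poem's lines for word list `words` and current fib pair (a'+1, b'+1)
def refLines (words : List String) (a' b' : Nat) : List String :=
  match words with
  | [] => []
  | w :: ws =>
    PySem.Str.join " " ((w :: ws).take (a' + 1) ++
        List.replicate ((a' + 1) - (w :: ws).length) "_")
      :: refLines ((w :: ws).drop (a' + 1)) b' (a' + b' + 1)
termination_by words.length
decreasing_by simp

-- fibA on a natural argument is the first component of fibP
theorem fibA_foldl (n : Nat) :
    (PySem.List.pyRange 0 (n : Int) 1).foldl
      (fun (p : Int × Int) _ => (p.2, p.1 + p.2)) (0, 1)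
    = (((fibP n).1 : Int), ((fibP n).2 : Int)) := by
  induction n with
  | zero => simp [PySem.List.pyRange_one_eq_nil, fibP]
  | succ n ih =>
    rw [show ((n+1 : Nat) : Int) = (n : Int) + 1 by push_cast; ring,
        PySem.List.pyRange_one_succ_right (by positivity)]
    simp [List.foldl_append, ih, fibP]

theorem fibA_eq (n : Nat) : fibA (n : Int) = ((fibP n).1 : Int) := by
  simp [fibA, fibA_foldl]

-- appending one piece to a nonempty join
theorem join_append_singleton (sep : List Char) (m : List (List Char)) (d : List Char)
    (hm : m ≠ []) :
    PySem.Chars.join sep (m ++ [d]) = PySem.Chars.join sep m ++ sep ++ d := by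
  induction m with
  | nil => simp at hm
  | cons p q ih =>
    cases q with
    | nil => simp [PySem.Chars.join_cons_cons, PySem.Chars.join_singleton]
    | cons q' rest =>
      have h1 : (p :: q' :: rest) ++ [d] = p :: q' :: (rest ++ [d]) := rfl
      rw [h1, PySem.Chars.join_cons_cons]
      have h2 : q' :: (rest ++ [d]) = (q' :: rest) ++ [d] := rfl
      rw [h2, ih (by simp), PySem.Chars.join_cons_cons]
      simp

-- padding with k "_" words equals appending k copies of " _"
theorem join_pad_chars (k : Nat) (l : List (List Char)) (hl : l ≠ []) :
    PySem.Chars.join [' '] (l ++ List.replicate k ['_'])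
      = PySem.Chars.join [' '] l ++ (List.replicate k [' ', '_']).flatten := by
  induction k with
  | zero => simp
  | succ k ih =>
    rw [List.replicate_succ' (n := k), ← List.append_assoc,
        join_append_singleton [' '] (l ++ List.replicate k ['_']) ['_'] (by simp [hl]),
        ih, List.replicate_succ' (n := k), List.flatten_append]
    simp

theorem join_pad (k : Nat) (xs : List String) (hx : xs ≠ []) :
    PySem.Str.join " " (xs ++ List.replicate k "_")
      = PySem.Str.join " " xs ++ String.ofList ((List.replicate k [' ', '_']).flatten) := by
  rw [← String.toList_inj]
  simp only [String.toList_append, PySem.Str.toList_join, String.toList_ofList,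
    List.map_append, List.map_replicate]
  have h1 : " ".toList = [' '] := rfl
  have h2 : "_".toList = ['_'] := rfl
  rw [h1, h2, join_pad_chars k (xs.map String.toList) (by simp [hx])]

theorem fiboLoop_ref (fuel : Nat) :
    ∀ (words : List String) (c : Nat) (acc : List String) (a' b' : Nat),
      words.length ≤ fuel → fibP (c + 1) = (a' + 1, b' + 1) →
      fiboLoop fuel ((c : Int) + 1) words acc = acc ++ refLines words a' b' := by
  induction fuel with
  | zero =>
    intro words c acc a' b' hlen _
    have : words = [] := by
      cases words with
      | nil => rfl
      | cons w ws => simp at hlen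
    subst this
    simp [fiboLoop, refLines]
  | succ fuel ih =>
    intro words c acc a' b' hlen hfib
    cases words with
    | nil => simp [fiboLoop, refLines]
    | cons w ws =>
      have hcast : ((c : Int) + 1) = ((c + 1 : Nat) : Int) := by push_cast; ring
      have hnum : fibA ((c : Int) + 1) = ((a' + 1 : Nat) : Int) := by
        rw [hcast, fibA_eq, hfib]
      rw [fiboLoop]
      simp only [hnum, reduceCtorEq, if_false,
        PySem.List.slice_to_natCast, PySem.List.slice_from_natCast]
      -- line equality
      have hk : ((a' + 1 : Nat) : Int) - ((((w :: ws).take (a' + 1)).length : Nat) : Int)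
          = (((a' + 1) - (w :: ws).length : Nat) : Int) := by
        simp; omega
      have hline : PySem.Str.join " " ((w :: ws).take (a' + 1)) ++ String.ofList
            (PySem.List.pyRepeat [' ', '_']
              (((a' + 1 : Nat) : Int) - (((w :: ws).take (a' + 1)).length : Int)))
          = PySem.Str.join " " ((w :: ws).take (a' + 1) ++
              List.replicate ((a' + 1) - (w :: ws).length) "_") := by
        rw [hk, join_pad _ _ (by simp)]
        simp [PySem.List.pyRepeat]
      have hfib2 : fibP (c + 1 + 1) = (b' + 1, a' + b' + 1 + 1) := by
        have h0 : fibP (c + 1 + 1)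
            = ((fibP (c + 1)).2, (fibP (c + 1)).1 + (fibP (c + 1)).2) := rfl
        rw [h0, hfib]
        simp [Prod.ext_iff]; omega
      rw [show (c : Int) + 1 + 1 = ((c + 1 : Nat) : Int) + 1 by push_cast; ring]
      rw [ih ((w :: ws).drop (a' + 1)) (c + 1) _ b' (a' + b' + 1)
            (by simp at hlen ⊢; omega) hfib2]
      rw [refLines, ← hline]
      simp

-- B's size loop, rephrased on the remaining word count
def sizesR (fuel : Nat) (a b r : Nat) : List Nat :=
  match fuel with
  | 0 => []
  | fuel + 1 => if 0 < r then a :: sizesR fuel b (a + b) (r - a) else []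

theorem fibSizes_eq (fuel : Nat) :
    ∀ a b total len, fibSizes fuel a b total len = sizesR fuel a b (len - total) := by
  induction fuel with
  | zero => intros; rfl
  | succ fuel ih =>
    intro a b total len
    simp only [fibSizes, sizesR]
    by_cases h : total < len
    · simp [h, show 0 < len - total from by omega, ih, Nat.sub_sub]
    · simp [h, show ¬ 0 < len - total from by omega]

-- B's chunk loop, rephrased as consuming the padded list
def chunksC : List Nat → List String → List String
  | [], _ => []
  | n :: rest, l => PySem.Str.join " " (l.take n) :: chunksC rest (l.drop n)

theorem chunkJoin_eq (sizes : List Nat) :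
    ∀ i padded, chunkJoin sizes i padded = chunksC sizes (padded.drop i) := by
  induction sizes with
  | nil => intros; rfl
  | cons n rest ih =>
    intro i padded
    simp [chunkJoin, chunksC, ih, List.drop_drop, Nat.add_comm]

theorem sizesR_zero (fuel a b : Nat) : sizesR fuel a b 0 = [] := by
  cases fuel <;> simp [sizesR]

-- B's chunking computes refLines
theorem chunks_ref (fuel : Nat) :
    ∀ (words : List String) (a' b' : Nat), words.length ≤ fuel →
      chunksC (sizesR fuel (a' + 1) (b' + 1) words.length)
          (words ++
            List.replicate ((sizesR fuel (a' + 1) (b' + 1) words.length).sum - words.length) "_")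
        = refLines words a' b' := by
  induction fuel with
  | zero =>
    intro words a' b' hlen
    have : words = [] := by cases words with | nil => rfl | cons w ws => simp at hlen
    subst this
    simp [sizesR, chunksC, refLines]
  | succ fuel ih =>
    intro words a' b' hlen
    cases words with
    | nil => simp [sizesR, chunksC, refLines]
    | cons w ws =>
      have hlen1 : 0 < (w :: ws).length := by simp
      rw [sizesR, if_pos hlen1]
      set len := (w :: ws).length with hlendef
      set S := sizesR fuel (b' + 1) (a' + 1 + (b' + 1)) (len - (a' + 1)) with hS
      rw [chunksC, refLines]
      by_cases hle : a' + 1 ≤ len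
      · -- first line takes only real words
        have hdlen : ((w :: ws).drop (a' + 1)).length = len - (a' + 1) := by
          simp [hlendef]
        have htake : ((w :: ws) ++ List.replicate (((a' + 1) :: S).sum - len) "_").take (a' + 1)
            = (w :: ws).take (a' + 1) := by
          rw [List.take_append_of_le_length (by omega)]
        have hpad0 : (a' + 1) - len = 0 := by omega
        have harith : ((a' + 1) :: S).sum - len = S.sum - (len - (a' + 1)) := by
          simp only [List.sum_cons]; omega
        have hdrop : ((w :: ws) ++ List.replicate (((a' + 1) :: S).sum - len) "_").drop (a' + 1)
            = (w :: ws).drop (a' + 1) ++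
              List.replicate (S.sum - ((w :: ws).drop (a' + 1)).length) "_" := by
          rw [List.drop_append_of_le_length (by omega), harith, hdlen]
        have hS' : S = sizesR fuel (b' + 1) (a' + b' + 1 + 1)
            ((w :: ws).drop (a' + 1)).length := by
          rw [hS, hdlen, show a' + 1 + (b' + 1) = a' + b' + 1 + 1 from by omega]
        rw [htake, hpad0, hdrop, hS',
            ih ((w :: ws).drop (a' + 1)) b' (a' + b' + 1) (by rw [hdlen]; omega)]
        simp
      · -- the words run out inside the first line
        have hr0 : len - (a' + 1) = 0 := by omega
        have hS0 : S = [] := by rw [hS, hr0, sizesR_zero]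
        rw [hS0]
        simp only [chunksC, List.sum_cons, List.sum_nil, Nat.add_zero]
        have h1 : (w :: ws).take (a' + 1) = w :: ws :=
          List.take_of_length_le (by omega)
        have h2 : ((w :: ws) ++ List.replicate ((a' + 1) - len) "_").take (a' + 1)
            = (w :: ws) ++ List.replicate ((a' + 1) - len) "_" :=
          List.take_of_length_le
            (by simp only [List.length_append, List.length_replicate, ← hlendef]; omega)
        have h3 : (w :: ws).drop (a' + 1) = [] := List.drop_eq_nil_of_le (by omega)
        rw [h2, h3]
        simp [h1, refLines, hlendef]

-- ===== VERDICT (by name: the statement is the Claim_ definition above) =====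
theorem poem_key (ws : List String) :
    PySem.Str.join "\n" (fiboLoop ws.length 1 ws []) =
      (if ws = [] then "" else
        PySem.Str.join "\n" (chunkJoin (fibSizes ws.length 1 1 0 ws.length) 0
          (ws ++ List.replicate
            ((fibSizes ws.length 1 1 0 ws.length).sum - ws.length) "_"))) := by
  by_cases hws : ws = []
  · subst hws
    simp [fiboLoop]
    rfl
  · rw [if_neg hws]
    have hA : fiboLoop ws.length 1 ws [] = refLines ws 0 0 := by
      have h1 : (1 : Int) = ((0 : Nat) : Int) + 1 := by norm_num
      rw [h1, fiboLoop_ref ws.length ws 0 [] 0 0 le_rfl rfl]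
      simp
    have hB : chunkJoin (fibSizes ws.length 1 1 0 ws.length) 0
        (ws ++ List.replicate ((fibSizes ws.length 1 1 0 ws.length).sum - ws.length) "_")
        = refLines ws 0 0 := by
      rw [chunkJoin_eq, List.drop_zero, fibSizes_eq, Nat.sub_zero]
      exact chunks_ref ws.length ws 0 0 le_rfl
    rw [hA, hB]

theorem fibo_poem_spec : Claim_equal_fibo_poem := by
  intro text _
  show fibo_poem text = fibo_poem_alt text
  exact poem_key (PySem.Str.split₀ text)
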